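-- pv_equiv track=rewrite | github.com/crackalove/patchscan | patchscan.py | _mnemonic_3grams
-- ===== SOURCE A (Python) =====
-- from collections import Counter, defaultdict, deque
-- from typing import Dict, List, Optional, Tuple, Set, Any
--
-- def _mnemonic_3grams(mnems: List[str]) -> Counter:
--     c = Counter()
--     if len(mnems) < 3:
--         return c
--     for a, b, d in zip(mnems, mnems[1:], mnems[2:]):
--         if not a or not b or not d:
--             continue
--         c[f"{a}|{b}|{d}"] += 1
--     return c
-- ===== SOURCE B (Python) =====
-- from collections import Counter
-- from typing import List
--
-- def _mnemonic_3grams(mnems: List[str]) -> Counter: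
--     c = Counter()
--     # split into maximal runs of truthy strings
--     runs = []
--     cur = []
--     for m in mnems:
--         if m:
--             cur.append(m)
--         else:
--             if cur:
--                 runs.append(cur)
--             cur = []
--     if cur:
--         runs.append(cur)
--     # count 3-grams inside each run (no skipping needed there)
--     for r in runs:
--         for a, b, d in zip(r, r[1:], r[2:]):
--             c[f"{a}|{b}|{d}"] += 1
--     return c
-- ===== Notes on version B (the rewrite author's own statement) =====
-- stated objective: alternative
-- what changed: B first splits mnems into maximal runs of truthy strings in one pass and then counts consecutive 3-grams within each run, replacing A's single zip-with-skip loop over all triples.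
import Mathlib
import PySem

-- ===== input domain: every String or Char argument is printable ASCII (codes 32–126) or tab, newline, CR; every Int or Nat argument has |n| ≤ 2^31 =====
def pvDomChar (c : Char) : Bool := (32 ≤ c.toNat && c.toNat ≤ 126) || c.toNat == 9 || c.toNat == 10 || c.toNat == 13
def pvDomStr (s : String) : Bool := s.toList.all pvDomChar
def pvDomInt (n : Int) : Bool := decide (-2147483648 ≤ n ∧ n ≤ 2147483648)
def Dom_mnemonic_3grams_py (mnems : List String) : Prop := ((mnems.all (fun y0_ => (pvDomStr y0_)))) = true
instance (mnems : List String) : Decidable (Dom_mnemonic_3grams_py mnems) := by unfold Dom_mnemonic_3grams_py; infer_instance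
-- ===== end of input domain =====

-- B splits the input into maximal runs of truthy strings and counts 3-grams per run (alternative decomposition, same cost).


-- ===== PORT A =====
def mnemonic_3grams_py (mnems : List String) : List (String × Int) :=
  let c : PySem.Dict String Int := PySem.Dict.empty
  if mnems.length < 3 then c.items
  else
    ((mnems.zip ((PySem.List.slice mnems (some 1) none).zip (PySem.List.slice mnems (some 2) none))).foldl
      (fun c t =>
        if t.1 == "" || t.2.1 == "" || t.2.2 == "" then c
        else c.modify (t.1 ++ "|" ++ t.2.1 ++ "|" ++ t.2.2) 0 (· + 1)) c).items

-- ===== PORT B =====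
def mnemonic_3grams_py_alt (mnems : List String) : List (String × Int) :=
  -- split into maximal runs of truthy strings
  let st := mnems.foldl
    (fun (st : List (List String) × List String) m =>
      if m == "" then (if st.2.isEmpty then st.1 else st.1 ++ [st.2], ([] : List String))
      else (st.1, st.2 ++ [m]))
    (([], []) : List (List String) × List String)
  let runs := if st.2.isEmpty then st.1 else st.1 ++ [st.2]
  -- count 3-grams inside each run
  let c := runs.foldl
    (fun (c : PySem.Dict String Int) r =>
      (r.zip ((PySem.List.slice r (some 1) none).zip (PySem.List.slice r (some 2) none))).foldl
        (fun c t => c.modify (t.1 ++ "|" ++ t.2.1 ++ "|" ++ t.2.2) 0 (· + 1)) c)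
    (PySem.Dict.empty)
  c.items

-- ===== PRECONDITION & SPEC =====
def Spec_mnemonic_3grams_py (mnems : List String) (out : List (String × Int)) : Prop := out = mnemonic_3grams_py_alt mnems
instance (mnems : List String) (out : List (String × Int)) : Decidable (Spec_mnemonic_3grams_py mnems out) := by unfold Spec_mnemonic_3grams_py; infer_instance

-- ===== CLAIM (what is proved, stated in full; the proofs are below) =====
def Claim_equal_mnemonic_3grams_py : Prop := ∀ (mnems : List String), Dom_mnemonic_3grams_py mnems → Spec_mnemonic_3grams_py mnems (mnemonic_3grams_py mnems)

-- ===== LEMMAS AND PROOFS =====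

/-- Consecutive triples of a list (the zip3 of A's loop, structurally). -/
def trip : List String → List (String × String × String)
  | a :: b :: c :: rest => (a, b, c) :: trip (b :: c :: rest)
  | _ => []

/-- Maximal truthy runs, continuing a current run `cur`. -/
def splitRuns (cur : List String) : List String → List (List String)
  | [] => if cur.isEmpty then [] else [cur]
  | m :: xs =>
      if m == "" then (if cur.isEmpty then [] else [cur]) ++ splitRuns [] xs
      else splitRuns (cur ++ [m]) xs

def mkKey (t : String × String × String) : String := t.1 ++ "|" ++ t.2.1 ++ "|" ++ t.2.2

def keepT (t : String × String × String) : Bool := !(t.1 == "" || t.2.1 == "" || t.2.2 == "")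

def countFold (c : PySem.Dict String Int) (ks : List String) : PySem.Dict String Int :=
  ks.foldl (fun d k => d.modify k 0 (· + 1)) c

theorem slice_one (r : List String) : PySem.List.slice r (some 1) none = r.tail :=
  PySem.List.slice_from_one r

theorem slice_two (r : List String) : PySem.List.slice r (some 2) none = r.drop 2 := by
  rw [show (2 : Int) = ((2 : Nat) : Int) by norm_num, PySem.List.slice_from_natCast]

theorem zip_eq_trip (r : List String) :
    r.zip ((PySem.List.slice r (some 1) none).zip (PySem.List.slice r (some 2) none)) = trip r := by
  rw [slice_one, slice_two]
  induction r using trip.induct with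
  | case1 a b c rest ih => simpa [trip, List.zip] using ih
  | case2 t h =>
    rcases t with _ | ⟨a, _ | ⟨b, _ | ⟨c, r⟩⟩⟩
    · rfl
    · rfl
    · rfl
    · exact absurd rfl (h a b c r)

theorem countFold_append (c : PySem.Dict String Int) (ks ls : List String) :
    countFold c (ks ++ ls) = countFold (countFold c ks) ls := by
  simp [countFold, List.foldl_append]

theorem foldA_eq (ts : List (String × String × String)) (c : PySem.Dict String Int) :
    ts.foldl (fun c t =>
        if t.1 == "" || t.2.1 == "" || t.2.2 == "" then c
        else c.modify (t.1 ++ "|" ++ t.2.1 ++ "|" ++ t.2.2) 0 (· + 1)) c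
      = countFold c ((ts.filter keepT).map mkKey) := by
  induction ts generalizing c with
  | nil => rfl
  | cons t ts ih =>
    by_cases h : (t.1 == "" || t.2.1 == "" || t.2.2 == "") = true
    · rw [List.foldl_cons, if_pos h, ih, List.filter_cons, if_neg (by simp [keepT, h])]
    · rw [List.foldl_cons, if_neg h, ih, List.filter_cons,
        if_pos (by simp only [Bool.not_eq_true] at h; simp [keepT, h])]
      rfl

theorem foldB_eq (ts : List (String × String × String)) (c : PySem.Dict String Int) :
    ts.foldl (fun c t => c.modify (t.1 ++ "|" ++ t.2.1 ++ "|" ++ t.2.2) 0 (· + 1)) c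
      = countFold c (ts.map mkKey) := by
  simp [countFold, List.foldl_map, mkKey]

theorem outer_eq (g : List String → List String) (runs : List (List String)) (c : PySem.Dict String Int) :
    runs.foldl (fun c r => countFold c (g r)) c = countFold c (runs.flatMap g) := by
  induction runs generalizing c with
  | nil => rfl
  | cons r runs ih => simp [List.foldl_cons, List.flatMap_cons, countFold_append, ih]

theorem runsFold_eq (xs : List String) (runs0 : List (List String)) (cur : List String) :
    (let st := xs.foldl
        (fun (st : List (List String) × List String) m =>
          if m == "" then (if st.2.isEmpty then st.1 else st.1 ++ [st.2], ([] : List String))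
          else (st.1, st.2 ++ [m])) (runs0, cur)
     if st.2.isEmpty then st.1 else st.1 ++ [st.2])
      = runs0 ++ splitRuns cur xs := by
  induction xs generalizing runs0 cur with
  | nil => simp only [List.foldl_nil, splitRuns]; split <;> simp
  | cons m xs ih =>
    simp only [List.foldl_cons]
    by_cases h : (m == "") = true
    · simp only [h, if_true]
      by_cases hc : cur.isEmpty
      · simp only [hc, if_true]
        rw [ih]
        simp [splitRuns, h, hc]
      · simp only [hc, if_false, Bool.false_eq_true]
        rw [ih]
        simp [splitRuns, h, hc, List.append_assoc]
    · simp only [h, if_false, Bool.false_eq_true]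
      rw [ih]
      simp [splitRuns, h]

theorem mem_trip (t : String × String × String) (xs : List String) (h : t ∈ trip xs) :
    t.1 ∈ xs ∧ t.2.1 ∈ xs ∧ t.2.2 ∈ xs := by
  induction xs using trip.induct with
  | case1 a b c rest ih =>
    simp only [trip, List.mem_cons] at h
    rcases h with rfl | h
    · simp
    · obtain ⟨h1, h2, h3⟩ := ih h
      exact ⟨List.mem_cons_of_mem _ h1, List.mem_cons_of_mem _ h2, List.mem_cons_of_mem _ h3⟩
  | case2 r hr =>
    rcases r with _ | ⟨a, _ | ⟨b, _ | ⟨c, rest⟩⟩⟩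
    · simp [trip] at h
    · simp [trip] at h
    · simp [trip] at h
    · exact absurd rfl (hr a b c rest)

theorem filter_trip_truthy (cur : List String) (hcur : ∀ m ∈ cur, m ≠ "") :
    (trip cur).filter keepT = trip cur := by
  apply List.filter_eq_self.2
  intro t ht
  obtain ⟨h1, h2, h3⟩ := mem_trip t cur ht
  simp [keepT, hcur _ h1, hcur _ h2, hcur _ h3]

theorem split_sep (ys zs : List String) :
    (trip (ys ++ "" :: zs)).filter keepT = (trip ys).filter keepT ++ (trip zs).filter keepT := by
  induction ys with
  | nil =>
    match zs with
    | [] => rfl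
    | [z] => rfl
    | z1 :: z2 :: r => simp [trip, keepT]
  | cons y ys ih =>
    match ys with
    | [] =>
      match zs with
      | [] => rfl
      | [z] => simp [trip, keepT]
      | z1 :: z2 :: r => simpa [trip, keepT, List.filter_cons] using ih
    | [c] =>
      simpa [trip, keepT, List.filter_cons] using ih
    | c :: d :: t =>
      have ih' := ih
      simp only [List.cons_append] at ih' ⊢
      simp only [trip, List.filter_cons]
      rw [ih']
      split <;> simp

theorem main_split (xs cur : List String) (hcur : ∀ m ∈ cur, m ≠ "") :
    (trip (cur ++ xs)).filter keepT = (splitRuns cur xs).flatMap trip := by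
  induction xs generalizing cur with
  | nil =>
    simp only [List.append_nil, splitRuns]
    by_cases hc : cur.isEmpty
    · simp_all [List.isEmpty_iff, trip]
    · simp [hc, filter_trip_truthy cur hcur]
  | cons m xs ih =>
    by_cases h : (m == "") = true
    · have hm : m = "" := by simpa using h
      subst hm
      rw [split_sep cur xs]
      simp only [splitRuns, h, if_true, List.flatMap_append]
      have h0 := ih [] (by simp)
      simp only [List.nil_append] at h0
      rw [← h0, filter_trip_truthy cur hcur]
      by_cases hc : cur.isEmpty
      · simp_all [List.isEmpty_iff, trip]
      · simp [hc]
    · have hm : m ≠ "" := by simpa using h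
      have hx : ∀ x ∈ cur ++ [m], x ≠ "" := by
        intro x hmem
        rcases List.mem_append.1 hmem with h1 | h2
        · exact hcur _ h1
        · rw [List.mem_singleton] at h2
          subst h2
          exact hm
      have hsplit : cur ++ m :: xs = (cur ++ [m]) ++ xs := by simp
      rw [hsplit, ih (cur ++ [m]) hx]
      simp [splitRuns, h]

theorem trip_short (mnems : List String) (h : mnems.length < 3) : trip mnems = [] := by
  match mnems with
  | [] => rfl
  | [a] => rfl
  | [a, b] => rfl
  | a :: b :: c :: r => simp at h; omega

theorem portA_eq (mnems : List String) :
    mnemonic_3grams_py mnems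
      = (countFold PySem.Dict.empty (((trip mnems).filter keepT).map mkKey)).items := by
  unfold mnemonic_3grams_py
  by_cases h : mnems.length < 3
  · simp [h, trip_short mnems h, countFold]
  · simp only [h, if_false]
    rw [zip_eq_trip, foldA_eq]

theorem portB_eq (mnems : List String) :
    mnemonic_3grams_py_alt mnems
      = (countFold PySem.Dict.empty ((splitRuns [] mnems).flatMap (fun r => (trip r).map mkKey))).items := by
  unfold mnemonic_3grams_py_alt
  have hruns := runsFold_eq mnems [] []
  simp only [List.nil_append] at hruns
  simp only []
  rw [hruns]
  congr 1
  have hfun : (fun (c : PySem.Dict String Int) (r : List String) =>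
      (r.zip ((PySem.List.slice r (some 1) none).zip (PySem.List.slice r (some 2) none))).foldl
        (fun c t => c.modify (t.1 ++ "|" ++ t.2.1 ++ "|" ++ t.2.2) 0 (· + 1)) c)
      = (fun c r => countFold c ((trip r).map mkKey)) := by
    funext c r
    rw [zip_eq_trip, foldB_eq]
  rw [hfun, outer_eq]

-- ===== VERDICT (by name: the statement is the Claim_ definition above) =====
theorem mnemonic_3grams_py_spec : Claim_equal_mnemonic_3grams_py := by
  intro mnems _
  unfold Spec_mnemonic_3grams_py
  rw [portA_eq, portB_eq]
  congr 1
  have h := main_split mnems [] (by simp)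
  simp only [List.nil_append] at h
  rw [h, List.map_flatMap]
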